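-- pv_equiv track=rewrite | github.com/nadineelnaggar/Counters | GenerateDatasets.py | generateCountDataset
-- ===== SOURCE A (Python) =====
-- class Count_Task_Bracket_Generator(object):
--     def generateParenthesis(self, n):
--         def generate(A = []):
--             if len(A) == 2*n:
--                 if pos(A):
--                     positive.append("".join(A))
--                 else:
--                     zero_neg.append("".join(A))
--             else:
--                 A.append('(')
--                 generate(A)
--                 A.pop()
--                 A.append(')')
--                 generate(A)
--                 A.pop()
--
--         def pos(A):
--             bal = 0
--             for c in A:
--                 if c == '(': bal += 1
--                 else: bal -= 1
--                 # if bal <= 0: return False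
--             return bal > 0
--
--         positive = []
--         zero_neg = []
--         generate()
--         return positive, zero_neg
--
-- def generateCountDataset(n_bracket_pairs_start, n_bracket_pairs_end):
--     gen = Count_Task_Bracket_Generator()
--     # d1_valid, d1_invalid = gen.generateParenthesis(3)
--     pos = []
--     zero_neg = []
--     for i in range(n_bracket_pairs_start,n_bracket_pairs_end+1):
--         x,y = gen.generateParenthesis(i)
--         for elem in x:
--             pos.append(elem)
--         for elem in y:
--             zero_neg.append(elem)
--     return pos,zero_neg
-- ===== SOURCE B (Python) =====
-- def generateCountDataset(n_bracket_pairs_start, n_bracket_pairs_end):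
--     pos = []
--     zero_neg = []
--     for i in range(n_bracket_pairs_start, n_bracket_pairs_end + 1):
--         strs = ['']
--         for _ in range(2 * i):
--             strs = [t + c for t in strs for c in '()']
--         for t in strs:
--             bal = sum(1 if c == '(' else -1 for c in t)
--             if bal > 0:
--                 pos.append(t)
--             else:
--                 zero_neg.append(t)
--     return pos, zero_neg
-- ===== Notes on version B (the rewrite author's own statement) =====
-- stated objective: idiomatic
-- what changed: Replaces the recursive append/pop backtracking generator with an iterative breadth-first product enumeration (repeatedly extending a list of strings by '(' and ')'), partitioning each finished string by its balance in one pass.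
import Mathlib
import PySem

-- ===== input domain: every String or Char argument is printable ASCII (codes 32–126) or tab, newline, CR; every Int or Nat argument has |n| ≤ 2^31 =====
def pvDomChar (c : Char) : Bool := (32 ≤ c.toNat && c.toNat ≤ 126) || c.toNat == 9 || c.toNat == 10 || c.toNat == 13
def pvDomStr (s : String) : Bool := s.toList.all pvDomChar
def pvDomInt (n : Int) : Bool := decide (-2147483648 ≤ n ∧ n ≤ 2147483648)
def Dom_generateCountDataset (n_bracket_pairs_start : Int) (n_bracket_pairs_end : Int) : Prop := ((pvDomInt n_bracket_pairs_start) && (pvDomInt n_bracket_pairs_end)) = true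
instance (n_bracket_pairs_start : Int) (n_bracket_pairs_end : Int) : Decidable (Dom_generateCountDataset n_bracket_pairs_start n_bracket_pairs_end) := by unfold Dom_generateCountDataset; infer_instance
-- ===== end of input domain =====

-- B replaces A's recursive append/pop backtracking with an iterative product-style
-- enumeration (repeatedly extending all strings by '(' and ')'), partitioning by balance; same cost, more idiomatic.


-- ===== PORT A =====
-- helper `pos(A)`: running balance, returns bal > 0
def pvBalA (A : List Char) : Bool :=
  decide ((A.foldl (fun bal c => if c = '(' then bal + 1 else bal - 1) (0 : Int)) > 0)

-- `generate(A)`: the Python tests len(A) == 2*n; fuel = 2*n - len(A) mirrors that test,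
-- appending '(' then ')' and recursing depth-first exactly as A does
def pvGenA (fuel : Nat) (A : List Char) (acc : List String × List String) :
    List String × List String :=
  match fuel with
  | 0 =>
      if pvBalA A then (acc.1 ++ [String.ofList A], acc.2)
      else (acc.1, acc.2 ++ [String.ofList A])
  | k + 1 =>
      let acc1 := pvGenA k (A ++ ['(']) acc
      pvGenA k (A ++ [')']) acc1

def pvGenerateParenthesis (n : Int) : List String × List String :=
  pvGenA (2 * n).toNat [] ([], [])

def generateCountDataset (n_bracket_pairs_start : Int) (n_bracket_pairs_end : Int) : List String × List String :=
  (PySem.List.pyRange n_bracket_pairs_start (n_bracket_pairs_end + 1) 1).foldl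
    (fun acc i =>
      let xy := pvGenerateParenthesis i
      (acc.1 ++ xy.1, acc.2 ++ xy.2))
    ([], [])

-- ===== PORT B =====
-- `strs = [t + c for t in strs for c in '()']`
def pvExtend (strs : List String) : List String :=
  strs.flatMap (fun t => ['(', ')'].map (fun c => t.push c))

-- `bal = sum(1 if c == '(' else -1 for c in t)`
def pvBalB (t : String) : Int :=
  (t.toList.map (fun c => if c = '(' then (1 : Int) else -1)).sum

def generateCountDataset_alt (n_bracket_pairs_start : Int) (n_bracket_pairs_end : Int) : List String × List String :=
  (PySem.List.pyRange n_bracket_pairs_start (n_bracket_pairs_end + 1) 1).foldl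
    (fun acc i =>
      let strs := (PySem.List.pyRange 0 (2 * i) 1).foldl (fun st _ => pvExtend st) [""]
      strs.foldl
        (fun acc t =>
          if pvBalB t > 0 then (acc.1 ++ [t], acc.2) else (acc.1, acc.2 ++ [t]))
        acc)
    ([], [])

-- ===== PRECONDITION & SPEC =====
-- Pre_ excludes only the inputs where Python A raises: a non-empty range containing a
-- negative i makes A's `generate` recurse forever (RecursionError), since len(A) never reaches 2*i.
def Pre_generateCountDataset (n_bracket_pairs_start : Int) (n_bracket_pairs_end : Int) : Prop :=
  n_bracket_pairs_end < n_bracket_pairs_start ∨ 0 ≤ n_bracket_pairs_start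
instance (n_bracket_pairs_start : Int) (n_bracket_pairs_end : Int) : Decidable (Pre_generateCountDataset n_bracket_pairs_start n_bracket_pairs_end) := by unfold Pre_generateCountDataset; infer_instance

def pvWitness_generateCountDataset : Int × Int := (0, 2)

def Spec_generateCountDataset (n_bracket_pairs_start : Int) (n_bracket_pairs_end : Int) (out : List String × List String) : Prop := out = generateCountDataset_alt n_bracket_pairs_start n_bracket_pairs_end
instance (n_bracket_pairs_start : Int) (n_bracket_pairs_end : Int) (out : List String × List String) : Decidable (Spec_generateCountDataset n_bracket_pairs_start n_bracket_pairs_end out) := by unfold Spec_generateCountDataset; infer_instance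

-- ===== CLAIM (what is proved, stated in full; the proofs are below) =====
def Claim_equal_generateCountDataset : Prop := ∀ (n_bracket_pairs_start : Int) (n_bracket_pairs_end : Int), Dom_generateCountDataset n_bracket_pairs_start n_bracket_pairs_end → Pre_generateCountDataset n_bracket_pairs_start n_bracket_pairs_end → Spec_generateCountDataset n_bracket_pairs_start n_bracket_pairs_end (generateCountDataset n_bracket_pairs_start n_bracket_pairs_end)

-- ===== LEMMAS AND PROOFS =====

-- the tree of words A explores, in DFS ('(' first) order
def pvExt : Nat → List Char → List (List Char)
  | 0, A => [A]
  | k + 1, A => pvExt k (A ++ ['(']) ++ pvExt k (A ++ [')'])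

-- the shared partition loop, on the word level
def pvPart (l : List (List Char)) (acc : List String × List String) : List String × List String :=
  l.foldl
    (fun acc w =>
      if pvBalA w then (acc.1 ++ [String.ofList w], acc.2) else (acc.1, acc.2 ++ [String.ofList w]))
    acc

theorem pvGenA_eq_part (k : Nat) : ∀ (A : List Char) (acc : List String × List String),
    pvGenA k A acc = pvPart (pvExt k A) acc := by
  induction k with
  | zero => intro A acc; rfl
  | succ k ih =>
      intro A acc
      show pvGenA k (A ++ [')']) (pvGenA k (A ++ ['(']) acc) = _
      rw [ih, ih, pvExt]
      simp only [pvPart, List.foldl_append]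

theorem pvExt_snoc (k : Nat) : ∀ (A : List Char),
    pvExt (k + 1) A = (pvExt k A).flatMap (fun w => [w ++ ['('], w ++ [')']]) := by
  induction k with
  | zero => intro A; rfl
  | succ k ih =>
      intro A
      show pvExt (k+1) (A ++ ['(']) ++ pvExt (k+1) (A ++ [')']) = _
      rw [ih, ih]
      simp [pvExt]

theorem pvExtend_map_mk (l : List (List Char)) :
    pvExtend (l.map String.ofList) = (l.flatMap (fun w => [w ++ ['('], w ++ [')']])).map String.ofList := by
  induction l with
  | nil => rfl
  | cons w l ih =>
      have hpush : ∀ (c : Char), (String.ofList w).push c = String.ofList (w ++ [c]) := by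
        intro c
        apply String.toList_injective
        simp only [String.toList_push, String.toList_ofList]
      simp only [List.map_cons, pvExtend, List.flatMap_cons, List.map_append] at *
      rw [ih, hpush, hpush]
      rfl

theorem pvIterate_extend (k : Nat) :
    (fun st => pvExtend st)^[k] [""] = (pvExt k []).map String.ofList := by
  induction k with
  | zero => rfl
  | succ k ih =>
      rw [Function.iterate_succ_apply', ih, pvExtend_map_mk, ← pvExt_snoc]

theorem pvBalB_mk (w : List Char) : pvBalB (String.ofList w) > 0 ↔ pvBalA w = true := by
  have h : ∀ (b : Int), w.foldl (fun bal c => if c = '(' then bal + 1 else bal - 1) b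
      = b + (w.map (fun c => if c = '(' then (1 : Int) else -1)).sum := by
    induction w with
    | nil => intro b; simp
    | cons c w ih =>
        intro b
        by_cases hc : c = '(' <;> simp [hc, List.foldl_cons, ih] <;> ring
  simp [pvBalB, pvBalA, h 0, String.toList_ofList]

theorem pvPartB_map_mk (l : List (List Char)) : ∀ acc,
    (l.map String.ofList).foldl
      (fun acc t => if pvBalB t > 0 then (acc.1 ++ [t], acc.2) else (acc.1, acc.2 ++ [t])) acc
    = pvPart l acc := by
  induction l with
  | nil => intro acc; rfl
  | cons w l ih =>
      intro acc
      simp only [List.map_cons, List.foldl_cons, pvPart]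
      by_cases h : pvBalA w = true
      · rw [if_pos ((pvBalB_mk w).2 h), if_pos h]; exact ih _
      · rw [if_neg (fun hb => h ((pvBalB_mk w).1 hb)),
            if_neg (by simp [h] : ¬ pvBalA w = true)]
        exact ih _

theorem pvPart_shift (l : List (List Char)) : ∀ (p z : List String),
    pvPart l (p, z) = (p ++ (pvPart l ([], [])).1, z ++ (pvPart l ([], [])).2) := by
  induction l with
  | nil => intro p z; simp [pvPart]
  | cons w l ih =>
      intro p z
      have hstep : ∀ (p z : List String), pvPart (w :: l) (p, z)
          = pvPart l (if pvBalA w then (p ++ [String.ofList w], z) else (p, z ++ [String.ofList w])) := by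
        intro p z
        simp only [pvPart, List.foldl_cons]

      by_cases h : pvBalA w = true
      · rw [hstep, hstep, if_pos h, if_pos h, ih]
        simp only [List.nil_append]
        rw [ih [String.ofList w] []]
        simp
      · rw [hstep, hstep, if_neg h, if_neg h, ih]
        simp only [List.nil_append]
        rw [ih [] [String.ofList w]]
        simp

theorem pvFoldRange_extend (m : Int) :
    (PySem.List.pyRange 0 m 1).foldl (fun st _ => pvExtend st) [""]
      = (fun st => pvExtend st)^[m.toNat] [""] := by
  have h : ∀ (l : List Int) (st : List String),
      l.foldl (fun st _ => pvExtend st) st = (fun st => pvExtend st)^[l.length] st := by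
    intro l
    induction l with
    | nil => intro st; rfl
    | cons a l ih => intro st; simp [List.foldl_cons, ih, Function.iterate_succ_apply]
  rw [h]
  congr 1
  simp [PySem.List.length_pyRange_one]

theorem pvStep_eq (i : Int) (acc : List String × List String) :
    (let xy := pvGenerateParenthesis i; (acc.1 ++ xy.1, acc.2 ++ xy.2))
    = (let strs := (PySem.List.pyRange 0 (2 * i) 1).foldl (fun st _ => pvExtend st) [""]
       strs.foldl
         (fun acc t => if pvBalB t > 0 then (acc.1 ++ [t], acc.2) else (acc.1, acc.2 ++ [t]))
         acc) := by
  show (acc.1 ++ (pvGenerateParenthesis i).1, acc.2 ++ (pvGenerateParenthesis i).2) = _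
  rw [pvFoldRange_extend, pvIterate_extend, pvPartB_map_mk]
  unfold pvGenerateParenthesis
  rw [pvGenA_eq_part, pvPart_shift, pvPart_shift (pvExt (2*i).toNat []) acc.1 acc.2]
  simp

-- ===== VERDICT (by name: the statement is the Claim_ definition above) =====
theorem generateCountDataset_spec : Claim_equal_generateCountDataset := by
  intro s e _ _
  unfold Spec_generateCountDataset generateCountDataset generateCountDataset_alt
  congr 1
  funext acc i
  exact pvStep_eq i acc
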